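-- pv_equiv track=rewrite | github.com/GundalaNikhil/DSA | dsa-problems/verify_sorting_testcases_all_backup.py | longest_consecutive_one_change
-- ===== SOURCE A (Python) =====
-- def longest_consecutive_one_change(arr):
--     """Longest consecutive sequence with one element change."""
--     if not arr:
--         return 0
--
--     sorted_arr = sorted(arr)
--     max_len = 1
--
--     for i in range(len(arr)):
--         original = arr[i]
--         for new_val in range(min(arr), max(arr) + 2):
--             arr[i] = new_val
--             temp_sorted = sorted(arr)
--
--             current_len = 1
--             temp_max = 1
--             for j in range(1, len(temp_sorted)):
--                 if temp_sorted[j] == temp_sorted[j-1] + 1: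
--                     current_len += 1
--                     temp_max = max(temp_max, current_len)
--                 else:
--                     current_len = 1
--
--             max_len = max(max_len, temp_max)
--         arr[i] = original
--
--     return max_len
-- ===== SOURCE B (Python) =====
-- def longest_consecutive_one_change(arr):
--     """Longest consecutive sequence with one element change."""
--     if not arr:
--         return 0
--     s = sorted(arr)
--     lo, hi = min(arr), max(arr)
--     best = 1
--     for i in range(len(arr)):
--         base = list(s)
--         base.remove(arr[i])  # drop one copy of arr[i]; base stays sorted
--         k = 0                # insertion point; only moves right as v grows
--         for v in range(lo, hi + 2):
--             while k < len(base) and base[k] <= v: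
--                 k += 1
--             t = base[:k] + [v] + base[k:]
--             run = m = 1
--             for x, y in zip(t, t[1:]):
--                 run = run + 1 if y == x + 1 else 1
--                 if run > m:
--                     m = run
--             best = max(best, m)
--     return best
-- ===== Notes on version B (the rewrite author's own statement) =====
-- stated objective: alternative
-- what changed: B sorts the array once and, for each (index, candidate value), drops one copy from the maintained sorted list and splices the candidate in with a two-pointer insertion point that only advances as the candidate grows, scanning adjacent pairs with zip, instead of A's re-sorting the whole mutated array for every candidate and scanning by index.
import Mathlib
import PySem

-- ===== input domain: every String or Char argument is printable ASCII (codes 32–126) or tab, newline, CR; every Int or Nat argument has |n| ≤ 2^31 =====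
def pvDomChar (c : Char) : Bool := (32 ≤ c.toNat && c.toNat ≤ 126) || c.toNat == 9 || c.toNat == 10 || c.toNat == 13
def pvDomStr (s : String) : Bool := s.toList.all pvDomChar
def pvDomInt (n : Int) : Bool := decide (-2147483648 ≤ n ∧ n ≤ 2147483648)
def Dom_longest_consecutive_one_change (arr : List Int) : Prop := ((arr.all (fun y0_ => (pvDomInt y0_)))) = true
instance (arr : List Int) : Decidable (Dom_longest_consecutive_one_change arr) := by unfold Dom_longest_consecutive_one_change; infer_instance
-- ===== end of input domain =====

-- B sorts once and splices each candidate value into the maintained sorted list instead of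
-- re-sorting the whole array for every (index, value) pair; the run scan walks adjacent pairs.
-- A temporarily mutates arr but restores it before returning; B never mutates it.

-- ===== PORT A =====
-- inner scan: for j in range(1, len(t)): … (state = (current_len, temp_max)); returns temp_max
def pvScanA (t : List Int) : Int :=
  (((List.range t.length).drop 1).foldl
    (fun (st : Int × Int) j =>
      if t[j]! = t[j-1]! + 1 then (st.1 + 1, max st.2 (st.1 + 1)) else ((1 : Int), st.2))
    (1, 1)).2

def longest_consecutive_one_change (arr : List Int) : Int :=
  if arr = [] then 0
  else
    let _sorted_arr := PySem.List.sorted arr (fun x => x) false  -- computed and unused, as in A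
    (List.range arr.length).foldl
      (fun maxLen i =>
        -- min(arr)/max(arr): arr is nonempty here, the options are always some
        let lo := (PySem.List.min? arr (fun x => x)).getD 0
        let hi := (PySem.List.max? arr (fun x => x)).getD 0
        (PySem.List.pyRange lo (hi + 2) 1).foldl
          (fun maxLen newVal =>
            let tempSorted := PySem.List.sorted (arr.set i newVal) (fun x => x) false
            max maxLen (pvScanA tempSorted))
          maxLen)
      1

-- ===== PORT B =====
-- the while loop 'while k < len(base) and base[k] <= v: k += 1'
def pvAdvance (base : List Int) (v : Int) (k : Nat) : Nat :=
  if h : k < base.length ∧ base[k]! ≤ v then pvAdvance base v (k + 1) else k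
termination_by base.length - k
decreasing_by omega

-- for x, y in zip(t, t[1:]): … (state = (run, m)); returns m
def pvScanB (t : List Int) : Int :=
  ((t.zip (t.drop 1)).foldl
    (fun (st : Int × Int) p =>
      let run := if p.2 = p.1 + 1 then st.1 + 1 else (1 : Int)
      (run, if run > st.2 then run else st.2))
    (1, 1)).2

def longest_consecutive_one_change_alt (arr : List Int) : Int :=
  if arr = [] then 0
  else
    let s := PySem.List.sorted arr (fun x => x) false
    let lo := (PySem.List.min? arr (fun x => x)).getD 0
    let hi := (PySem.List.max? arr (fun x => x)).getD 0
    (List.range arr.length).foldl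
      (fun best i =>
        let base := (PySem.List.remove? s arr[i]!).getD []  -- arr[i] ∈ s, never none
        -- state = (best, k); the insertion point k only moves right as v grows
        ((PySem.List.pyRange lo (hi + 2) 1).foldl
          (fun (st : Int × Nat) v =>
            let k := pvAdvance base v st.2
            let t := base.take k ++ v :: base.drop k
            (max st.1 (pvScanB t), k))
          (best, 0)).1)
      1

-- ===== PRECONDITION & SPEC =====
def Spec_longest_consecutive_one_change (arr : List Int) (out : Int) : Prop := out = longest_consecutive_one_change_alt arr
instance (arr : List Int) (out : Int) : Decidable (Spec_longest_consecutive_one_change arr out) := by unfold Spec_longest_consecutive_one_change; infer_instance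

-- ===== CLAIM (what is proved, stated in full; the proofs are below) =====
def Claim_equal_longest_consecutive_one_change : Prop := ∀ (arr : List Int), Dom_longest_consecutive_one_change arr → Spec_longest_consecutive_one_change arr (longest_consecutive_one_change arr)

-- ===== LEMMAS AND PROOFS =====

-- the two scan-loop step functions (named for the fold rewrites below)
def pvStepA : Int × Int → Int × Int → Int × Int := fun st p =>
  if p.2 = p.1 + 1 then (st.1 + 1, max st.2 (st.1 + 1)) else ((1 : Int), st.2)

def pvStepB : Int × Int → Int × Int → Int × Int := fun st p =>
  let run := if p.2 = p.1 + 1 then st.1 + 1 else (1 : Int)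
  (run, if run > st.2 then run else st.2)

lemma pvStep_eq (ps : List (Int × Int)) : ∀ st : Int × Int, 1 ≤ st.2 →
    ps.foldl pvStepA st = ps.foldl pvStepB st := by
  induction ps with
  | nil => intro st h; rfl
  | cons p ps ih =>
    intro st h
    simp only [List.foldl_cons]
    by_cases hp : p.2 = p.1 + 1
    · have hstep : pvStepA st p = pvStepB st p := by
        simp only [pvStepA, pvStepB, hp, if_pos]
        rw [max_def]; split_ifs <;> simp <;> omega
      rw [← hstep]
      refine ih _ ?_
      simp only [pvStepA, hp, if_pos]
      have := le_max_left st.2 (st.1 + 1)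
      omega
    · have hstep : pvStepA st p = pvStepB st p := by
        simp only [pvStepA, pvStepB, if_neg hp]
        split_ifs <;> simp <;> omega
      rw [← hstep]
      refine ih _ ?_
      simp only [pvStepA, if_neg hp]
      exact h

-- A's index pairs (t[j-1], t[j]) for j = 1 .. n-1 are exactly zip(t, t[1:])
lemma pvPairs_eq (t : List Int) :
    ((List.range t.length).drop 1).map (fun j => (t[j-1]!, t[j]!)) = t.zip (t.drop 1) := by
  apply List.ext_getElem
  · simp [List.length_zip]
    try omega
  · intro i h1 h2
    have hlen : i + 1 < t.length := by
      simp [List.length_zip] at h2; omega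
    simp [List.getElem_zip, Nat.add_comm 1 i]
    constructor
    · rw [List.getElem?_eq_getElem (show i < t.length by omega)]
      rfl
    · rw [List.getElem?_eq_getElem hlen]
      rfl

lemma pvFoldl_map {α β γ : Type} (g : β → γ) (f : α → γ → α) (l : List β) (init : α) :
    (l.map g).foldl f init = l.foldl (fun a x => f a (g x)) init := by
  induction l generalizing init with
  | nil => rfl
  | cons x xs ih => simp only [List.map_cons, List.foldl_cons, ih]

lemma pvScan_eq (t : List Int) : pvScanA t = pvScanB t := by
  unfold pvScanA pvScanB
  rw [← pvPairs_eq]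
  exact congrArg Prod.snd
    (((pvFoldl_map (fun j => (t[j-1]!, t[j]!)) pvStepA
        ((List.range t.length).drop 1) ((1 : Int), (1 : Int))).symm).trans
      (pvStep_eq _ _ (by norm_num)))

-- the splice written as takeWhile/dropWhile (proof vocabulary for base[:k] + [v] + base[k:])
def pvInsSorted (v : Int) (l : List Int) : List Int :=
  l.takeWhile (fun x => decide (x ≤ v)) ++ v :: l.dropWhile (fun x => decide (x ≤ v))

-- splicing keeps the multiset
lemma pvIns_perm (v : Int) (l : List Int) : (pvInsSorted v l).Perm (v :: l) := by
  unfold pvInsSorted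
  have h := List.perm_middle (a := v)
    (l₁ := l.takeWhile (fun x => decide (x ≤ v))) (l₂ := l.dropWhile (fun x => decide (x ≤ v)))
  rwa [List.takeWhile_append_dropWhile] at h

lemma pvIns_mem {v b : Int} {l : List Int} (h : b ∈ pvInsSorted v l) : b = v ∨ b ∈ l := by
  have := (pvIns_perm v l).mem_iff.mp h
  simpa using this

-- splicing keeps the order
lemma pvIns_pairwise (v : Int) : ∀ l : List Int, l.Pairwise (· ≤ ·) →
    (pvInsSorted v l).Pairwise (· ≤ ·) := by
  intro l
  induction l with
  | nil => intro _; simp [pvInsSorted]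
  | cons a t ih =>
    intro hp
    rcases List.pairwise_cons.mp hp with ⟨ha, ht⟩
    by_cases hav : a ≤ v
    · have he : pvInsSorted v (a :: t) = a :: pvInsSorted v t := by
        simp [pvInsSorted, hav]
      rw [he, List.pairwise_cons]
      refine ⟨?_, ih ht⟩
      intro b hb
      rcases pvIns_mem hb with rfl | hb
      · exact hav
      · exact ha b hb
    · have he : pvInsSorted v (a :: t) = v :: a :: t := by
        simp [pvInsSorted, hav]
      rw [he, List.pairwise_cons]
      refine ⟨?_, hp⟩
      intro b hb
      rcases List.mem_cons.mp hb with rfl | hb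
      · omega
      · exact le_trans (by omega) (ha b hb)

-- sorting the one-element-changed array = splicing into the sorted array minus one copy
lemma pvSorted_set (arr : List Int) (i : Nat) (hi : i < arr.length) (v : Int) :
    PySem.List.sorted (arr.set i v) (fun x => x) false
  = pvInsSorted v ((PySem.List.sorted arr (fun x => x) false).erase arr[i]!) := by
  set s := PySem.List.sorted arr (fun x => x) false with hs
  have hx : arr[i]! = arr[i] := by
    simp [List.getElem!_eq_getElem?_getD, List.getElem?_eq_getElem hi]
  have hsperm : s.Perm arr := PySem.List.sorted_perm arr _ _
  have hsplit : arr = arr.take i ++ arr[i] :: arr.drop (i + 1) := by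
    conv_lhs => rw [← List.take_append_drop i arr]
    rw [List.drop_eq_getElem_cons hi]
  have hperm1 : arr.Perm (arr[i] :: arr.eraseIdx i) := by
    conv_lhs => rw [hsplit]
    rw [List.eraseIdx_eq_take_drop_succ]
    exact List.perm_middle
  have hperm2 : (arr.set i v).Perm (v :: arr.eraseIdx i) := by
    rw [List.set_eq_take_append_cons_drop, if_pos hi, List.eraseIdx_eq_take_drop_succ]
    exact List.perm_middle
  have hperm3 : (s.erase arr[i]!).Perm (arr.eraseIdx i) := by
    rw [hx]
    have hmem : arr[i] ∈ arr := List.getElem_mem hi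
    have h1 : (arr[i] :: arr.erase arr[i]).Perm (arr[i] :: arr.eraseIdx i) :=
      (List.perm_cons_erase hmem).symm.trans hperm1
    exact (hsperm.erase arr[i]).trans ((List.perm_cons arr[i]).mp h1)
  apply PySem.List.sorted_id_eq_of_perm_of_pairwise
  · exact (pvIns_perm v _).trans ((hperm3.cons v).trans hperm2.symm)
  · apply pvIns_pairwise
    have hp : s.Pairwise (fun a b => a ≤ b) := PySem.List.sorted_pairwise arr (fun x => x)
    exact List.Pairwise.sublist (List.erase_sublist) hp

-- ===== the two-pointer insertion point =====

-- number of elements ≤ w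
def pvCnt (base : List Int) (w : Int) : Nat := base.countP (fun x => decide (x ≤ w))

lemma pvCnt_le_length (base : List Int) (w : Int) : pvCnt base w ≤ base.length :=
  List.countP_le_length

lemma pvCnt_mono (base : List Int) {w w' : Int} (h : w ≤ w') : pvCnt base w ≤ pvCnt base w' := by
  apply List.countP_mono_left
  intro x _ hx
  simp only [decide_eq_true_eq] at hx ⊢
  omega

-- on a sorted list, the first pvCnt elements are exactly those ≤ w
lemma pvTakeWhile_eq_take (w : Int) : ∀ base : List Int, base.Pairwise (· ≤ ·) →
    base.takeWhile (fun x => decide (x ≤ w)) = base.take (pvCnt base w) := by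
  intro base
  induction base with
  | nil => intro _; rfl
  | cons a t ih =>
    intro hp
    rcases List.pairwise_cons.mp hp with ⟨ha, ht⟩
    by_cases haw : a ≤ w
    · have hc : pvCnt (a :: t) w = pvCnt t w + 1 := by
        simp [pvCnt, List.countP_cons, haw]
      rw [hc]
      simp [List.takeWhile_cons, haw, ih ht]
    · have hz : pvCnt (a :: t) w = 0 := by
        simp only [pvCnt, List.countP_eq_zero]
        intro x hx
        rcases List.mem_cons.mp hx with rfl | hx
        · simpa using haw
        · have := ha x hx
          simp only [decide_eq_true_eq]
          omega
      rw [hz]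
      simp [List.takeWhile_cons, haw]

lemma pvDropWhile_eq_drop (w : Int) : ∀ base : List Int, base.Pairwise (· ≤ ·) →
    base.dropWhile (fun x => decide (x ≤ w)) = base.drop (pvCnt base w) := by
  intro base
  induction base with
  | nil => intro _; rfl
  | cons a t ih =>
    intro hp
    rcases List.pairwise_cons.mp hp with ⟨ha, ht⟩
    by_cases haw : a ≤ w
    · have hc : pvCnt (a :: t) w = pvCnt t w + 1 := by
        simp [pvCnt, List.countP_cons, haw]
      rw [hc]
      simp [List.dropWhile_cons, haw, ih ht]
    · have hz : pvCnt (a :: t) w = 0 := by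
        simp only [pvCnt, List.countP_eq_zero]
        intro x hx
        rcases List.mem_cons.mp hx with rfl | hx
        · simpa using haw
        · have := ha x hx
          simp only [decide_eq_true_eq]
          omega
      rw [hz]
      simp [List.dropWhile_cons, haw]

lemma pvSplice_eq (v : Int) (base : List Int) (hp : base.Pairwise (· ≤ ·)) :
    base.take (pvCnt base v) ++ v :: base.drop (pvCnt base v) = pvInsSorted v base := by
  unfold pvInsSorted
  rw [pvTakeWhile_eq_take v base hp, pvDropWhile_eq_drop v base hp]

lemma pvCnt_lt_getElem {base : List Int} (hp : base.Pairwise (· ≤ ·)) {w : Int} {k : Nat}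
    (hk : k < pvCnt base w) : ∃ h : k < base.length, base[k] ≤ w := by
  have hlen : k < base.length := lt_of_lt_of_le hk (pvCnt_le_length base w)
  refine ⟨hlen, ?_⟩
  have htw := pvTakeWhile_eq_take w base hp
  have hmem : base[k] ∈ base.takeWhile (fun x => decide (x ≤ w)) := by
    rw [htw]
    have hkt : k < (base.take (pvCnt base w)).length := by
      rw [List.length_take]
      omega
    have hg := List.getElem_mem hkt
    rwa [List.getElem_take] at hg
  have := List.mem_takeWhile_imp hmem
  simpa using this

lemma pvCnt_getElem_gt {base : List Int} (hp : base.Pairwise (· ≤ ·)) {w : Int}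
    (hlt : pvCnt base w < base.length) : ¬ base[pvCnt base w]'hlt ≤ w := by
  have hdw := pvDropWhile_eq_drop w base hp
  have hne : base.dropWhile (fun x => decide (x ≤ w)) ≠ [] := by
    rw [hdw]
    simp [List.drop_eq_nil_iff]
    try omega
  have hhead := List.head_dropWhile_not (p := fun x => decide (x ≤ w)) (l := base) hne
  have hh : (base.dropWhile (fun x => decide (x ≤ w))).head hne = base[pvCnt base w]'hlt := by
    rw [List.head_eq_getElem]
    have : (base.dropWhile (fun x => decide (x ≤ w)))[0]'(by
        exact List.length_pos_iff.mpr hne) = base[pvCnt base w]'hlt := by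
      simp only [hdw]
      rw [List.getElem_drop]
      try congr 1
      try omega
      try simp
    exact this
  rw [hh] at hhead
  simpa using hhead

-- the while loop lands exactly on pvCnt
lemma pvAdvance_eq {base : List Int} (hp : base.Pairwise (· ≤ ·)) (v : Int) :
    ∀ k, k ≤ pvCnt base v → pvAdvance base v k = pvCnt base v := by
  intro k hk
  induction hfuel : base.length - k generalizing k with
  | zero =>
    have hkl : base.length ≤ k := by omega
    have : k = pvCnt base v := by
      have := pvCnt_le_length base v
      omega
    rw [pvAdvance, dif_neg (fun hc => absurd hc.1 (by omega)), this]
  | succ n ih =>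
    rw [pvAdvance]
    by_cases hcond : k < base.length ∧ base[k]! ≤ v
    · rw [dif_pos hcond]
      have hkne : k ≠ pvCnt base v := by
        intro heq
        rcases hcond with ⟨hkl, hle⟩
        have hge := pvCnt_getElem_gt hp (heq ▸ hkl)
        have : base[k]! = base[k]'hkl := by
          simp [List.getElem!_eq_getElem?_getD, List.getElem?_eq_getElem hkl]
        rw [this] at hle
        exact hge (heq ▸ hle)
      exact ih (k + 1) (by omega) (by omega)
    · rw [dif_neg hcond]
      by_contra hne
      have hklt : k < pvCnt base v := by omega
      rcases pvCnt_lt_getElem hp hklt with ⟨hkl, hle⟩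
      apply hcond
      refine ⟨hkl, ?_⟩
      have : base[k]! = base[k]'hkl := by
        simp [List.getElem!_eq_getElem?_getD, List.getElem?_eq_getElem hkl]
      rw [this]
      exact hle

-- the inner (best, k) two-pointer loop computes the same running max as the splice-per-v loop
lemma pvInner_eq (base : List Int) (hp : base.Pairwise (· ≤ ·)) :
    ∀ (n : Nat) (a b : Int), (b - a).toNat = n → ∀ (acc : Int) (k : Nat), k = pvCnt base (a - 1) →
    ((PySem.List.pyRange a b 1).foldl
      (fun (st : Int × Nat) v =>
        let k := pvAdvance base v st.2
        let t := base.take k ++ v :: base.drop k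
        (max st.1 (pvScanB t), k))
      (acc, k)).1
  = (PySem.List.pyRange a b 1).foldl
      (fun m v => max m (pvScanB (pvInsSorted v base))) acc := by
  intro n
  induction n with
  | zero =>
    intro a b hab acc k hk
    rw [PySem.List.pyRange_one_eq_nil (by omega)]
    rfl
  | succ n ih =>
    intro a b hab acc k hk
    rw [PySem.List.pyRange_one_cons (by omega)]
    simp only [List.foldl_cons]
    have hadv : pvAdvance base a k = pvCnt base a := by
      apply pvAdvance_eq hp
      rw [hk]
      exact pvCnt_mono base (by omega)
    have hsp := pvSplice_eq a base hp
    rw [hadv, hsp]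
    refine ih (a + 1) b (by omega) (max acc (pvScanB (pvInsSorted a base))) (pvCnt base a) ?_
    have hone : a + 1 - 1 = a := by omega
    rw [hone]

-- ===== VERDICT (by name: the statement is the Claim_ definition above) =====
theorem longest_consecutive_one_change_spec : Claim_equal_longest_consecutive_one_change := by
  intro arr _
  unfold Spec_longest_consecutive_one_change
  unfold longest_consecutive_one_change longest_consecutive_one_change_alt
  by_cases hnil : arr = []
  · simp [hnil]
  · simp only [if_neg hnil]
    apply PySem.List.foldl_congr_mem
    intro acc i himem
    have hi : i < arr.length := List.mem_range.mp himem
    have hx : arr[i]! = arr[i] := by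
      simp [List.getElem!_eq_getElem?_getD, List.getElem?_eq_getElem hi]
    have hmem : arr[i]! ∈ PySem.List.sorted arr (fun x => x) false := by
      rw [PySem.List.mem_sorted, hx]
      exact List.getElem_mem hi
    rw [PySem.List.remove?_eq_some_erase _ _ hmem]
    simp only [Option.getD_some]
    set base := (PySem.List.sorted arr (fun x => x) false).erase arr[i]! with hbase
    have hbp : base.Pairwise (· ≤ ·) := by
      have hp : (PySem.List.sorted arr (fun x => x) false).Pairwise (fun a b => a ≤ b) :=
        PySem.List.sorted_pairwise arr (fun x => x)
      exact List.Pairwise.sublist (List.erase_sublist) hp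
    -- the A side, rewritten per element to the splice form
    have hA : (PySem.List.pyRange ((PySem.List.min? arr (fun x => x)).getD 0)
          ((PySem.List.max? arr (fun x => x)).getD 0 + 2) 1).foldl
        (fun maxLen newVal =>
          max maxLen (pvScanA (PySem.List.sorted (arr.set i newVal) (fun x => x) false))) acc
      = (PySem.List.pyRange ((PySem.List.min? arr (fun x => x)).getD 0)
          ((PySem.List.max? arr (fun x => x)).getD 0 + 2) 1).foldl
        (fun m v => max m (pvScanB (pvInsSorted v base))) acc := by
      apply PySem.List.foldl_congr_mem
      intro acc2 v _
      rw [pvSorted_set arr i hi v, pvScan_eq, hbase]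
    rw [hA]
    -- start of the two-pointer loop: k = 0 = #elements ≤ lo - 1
    have hcnt0 : (0 : Nat) = pvCnt base ((PySem.List.min? arr (fun x => x)).getD 0 - 1) := by
      rcases hm : PySem.List.min? arr (fun x => x) with _ | m
      · cases harr : arr with
        | nil => exact absurd harr hnil
        | cons x t =>
          rw [harr, PySem.List.min?_id_cons] at hm
          cases hm
      · symm
        simp only [pvCnt, Option.getD_some, List.countP_eq_zero]
        intro x hxm
        have hxa : x ∈ arr := by
          have := List.mem_of_mem_erase hxm
          rwa [PySem.List.mem_sorted] at this
        have := PySem.List.min?_isMin hm x hxa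
        simp only [decide_eq_true_eq]
        omega
    exact (pvInner_eq base hbp _ ((PySem.List.min? arr (fun x => x)).getD 0)
      ((PySem.List.max? arr (fun x => x)).getD 0 + 2) rfl acc 0 hcnt0).symm
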